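-- pv_equiv track=rewrite | github.com/nasa/fprime | Autocoders/Python/src/fprime_ac/generators/visitors/PortHVisitor.py | _get_enum_string_list
-- ===== SOURCE A (Python) =====
-- def _get_enum_string_list(enum_list):
--     """"""
--     enum_tuple = enum_list[0]
--     enum_list = enum_list[1]
--     enum_str_list = []
--     for e in enum_list:
--         # No value, No comment
--         if (e[1] is None) and (e[2] is None):
--             s = "%s," % (e[0])
--         # No value, With comment
--         elif (e[1] is None) and (e[2] is not None):
--             s = "{},  // {}".format(e[0], e[2])
--         # With value, No comment
--         elif (e[1] is not None) and (e[2] is None):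
--             s = "{} = {},".format(e[0], e[1])
--         # With value and comment
--         elif (e[1] is not None) and (e[2] is not None):
--             s = "%s = %s,  // %s" % (e)
--         else:
--             pass
--         enum_str_list.append(s)
--
--     return (enum_tuple, enum_str_list)
-- ===== SOURCE B (Python) =====
-- def _get_enum_string_list(enum_list):
--     entries = enum_list[1]
--     # staged column passes: build the three text columns independently, then zip-join
--     names = [e[0] for e in entries]
--     values = ["" if e[1] is None else " = " + e[1] for e in entries]
--     comments = ["" if e[2] is None else "  // " + e[2] for e in entries]
--     lines = [n + v + "," + c for n, v, c in zip(names, values, comments)]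
--     return (enum_list[0], lines)
-- ===== Notes on version B (the rewrite author's own statement) =====
-- stated objective: alternative
-- what changed: Replaces the single loop with a 4-way if/elif select by a staged column decomposition: three independent passes build the name, ' = value' and ' // comment' columns, and a final zip pass joins them into the lines.
import Mathlib
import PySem

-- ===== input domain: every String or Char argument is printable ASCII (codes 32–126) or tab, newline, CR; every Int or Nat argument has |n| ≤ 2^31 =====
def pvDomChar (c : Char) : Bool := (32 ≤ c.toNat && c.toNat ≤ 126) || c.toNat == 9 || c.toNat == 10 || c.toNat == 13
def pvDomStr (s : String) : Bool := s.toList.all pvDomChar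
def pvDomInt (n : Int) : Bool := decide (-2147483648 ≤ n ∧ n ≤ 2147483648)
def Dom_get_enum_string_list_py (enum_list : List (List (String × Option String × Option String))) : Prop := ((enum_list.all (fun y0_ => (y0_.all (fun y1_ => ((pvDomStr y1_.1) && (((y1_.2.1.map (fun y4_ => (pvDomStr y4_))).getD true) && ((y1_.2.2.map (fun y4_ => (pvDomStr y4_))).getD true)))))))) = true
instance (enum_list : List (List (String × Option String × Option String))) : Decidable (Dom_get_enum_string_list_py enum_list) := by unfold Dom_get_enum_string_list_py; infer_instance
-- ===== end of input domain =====

-- B replaces A's single loop with its 4-way if/elif select by a staged column decomposition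
-- (three independent column passes, then a zip-join pass); objective: alternative.

-- ===== PORT A =====
-- the 4-way if/elif chain of A, in A's branch order
def pvA_line (e : String × Option String × Option String) : String :=
  if e.2.1 = none ∧ e.2.2 = none then e.1 ++ ","
  else if e.2.1 = none ∧ e.2.2 ≠ none then e.1 ++ ",  // " ++ e.2.2.getD ""
  else if e.2.1 ≠ none ∧ e.2.2 = none then e.1 ++ " = " ++ e.2.1.getD "" ++ ","
  else e.1 ++ " = " ++ e.2.1.getD "" ++ ",  // " ++ e.2.2.getD ""

def get_enum_string_list_py (enum_list : List (List (String × Option String × Option String))) : (List (String × Option String × Option String)) × List String :=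
  let enum_tuple := (PySem.List.pyGet? enum_list 0).getD []
  let entries := (PySem.List.pyGet? enum_list 1).getD []
  (enum_tuple, entries.foldl (fun acc e => acc ++ [pvA_line e]) [])

-- ===== PORT B =====
def get_enum_string_list_py_alt (enum_list : List (List (String × Option String × Option String))) : (List (String × Option String × Option String)) × List String :=
  let entries := (PySem.List.pyGet? enum_list 1).getD []
  let names := entries.map (fun e => e.1)
  let values := entries.map (fun e => match e.2.1 with | none => "" | some v => " = " ++ v)
  let comments := entries.map (fun e => match e.2.2 with | none => "" | some c => "  // " ++ c)
  let lines := (names.zip (values.zip comments)).map (fun p => p.1 ++ p.2.1 ++ "," ++ p.2.2)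
  ((PySem.List.pyGet? enum_list 0).getD [], lines)

-- ===== PRECONDITION & SPEC =====
-- Pre_ excludes only lists of fewer than two elements, on which Python A raises IndexError
def Pre_get_enum_string_list_py (enum_list : List (List (String × Option String × Option String))) : Prop := 2 ≤ enum_list.length
instance (enum_list : List (List (String × Option String × Option String))) : Decidable (Pre_get_enum_string_list_py enum_list) := by unfold Pre_get_enum_string_list_py; infer_instance
def pvWitness_get_enum_string_list_py : (List (List (String × Option String × Option String))) := ([[("T", none, none)], [("X", none, none), ("Y", some "1", none), ("Z", none, some "c"), ("W", some "2", some "d")]])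
def Spec_get_enum_string_list_py (enum_list : List (List (String × Option String × Option String))) (out : (List (String × Option String × Option String)) × List String) : Prop := out = get_enum_string_list_py_alt enum_list
instance (enum_list : List (List (String × Option String × Option String))) (out : (List (String × Option String × Option String)) × List String) : Decidable (Spec_get_enum_string_list_py enum_list out) := by unfold Spec_get_enum_string_list_py; infer_instance

-- ===== CLAIM (what is proved, stated in full; the proofs are below) =====
def Claim_equal_get_enum_string_list_py : Prop := ∀ (enum_list : List (List (String × Option String × Option String))), Dom_get_enum_string_list_py enum_list → Pre_get_enum_string_list_py enum_list → Spec_get_enum_string_list_py enum_list (get_enum_string_list_py enum_list)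

-- ===== LEMMAS AND PROOFS =====
lemma comma_comment (s : String) : "," ++ ("  // " ++ s) = ",  // " ++ s := by
  rw [← String.append_assoc]; rfl

-- A's per-element line equals B's zip-join of the three column entries, element by element
lemma columns_join (entries : List (String × Option String × Option String)) :
    ((entries.map (fun e => e.1)).zip
      ((entries.map (fun e => match e.2.1 with | none => "" | some v => " = " ++ v)).zip
       (entries.map (fun e => match e.2.2 with | none => "" | some c => "  // " ++ c)))).map
      (fun p => p.1 ++ p.2.1 ++ "," ++ p.2.2) = entries.map pvA_line := by
  induction entries with
  | nil => rfl
  | cons e tl ih =>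
    obtain ⟨n, v, c⟩ := e
    cases v <;> cases c <;>
      simp_all [pvA_line, String.append_assoc, comma_comment]

-- ===== VERDICT (by name: the statement is the Claim_ definition above) =====
theorem get_enum_string_list_py_spec : Claim_equal_get_enum_string_list_py := by
  intro enum_list _ _
  unfold Spec_get_enum_string_list_py get_enum_string_list_py get_enum_string_list_py_alt
  simp only [PySem.List.foldl_append_singleton_eq_map, columns_join, List.nil_append]
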